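-- pv_equiv track=rewrite | github.com/Bismarrck/vap | vap.py | get_elements_from_kbody_term
-- ===== SOURCE A (Python) =====
-- from typing import List
--
-- def get_elements_from_kbody_term(kbody_term: str) -> List[str]:
--     """
--     Extract elements from a k-body term.
--     """
--     sel = [0]
--     for i in range(len(kbody_term)):
--         if kbody_term[i].isupper():
--             sel.append(i + 1)
--         else:
--             sel[-1] += 1
--     atoms = []
--     for i in range(len(sel) - 1):
--         atoms.append(kbody_term[sel[i]: sel[i + 1]])
--     return atoms
-- ===== SOURCE B (Python) =====
-- def get_elements_from_kbody_term(kbody_term):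
--     atoms = []
--     cur = None
--     for ch in kbody_term:
--         if ch.isupper():
--             if cur is not None:
--                 atoms.append(cur)
--             cur = ch
--         elif cur is not None:
--             cur += ch
--     if cur is not None:
--         atoms.append(cur)
--     return atoms
-- ===== Notes on version B (the rewrite author's own statement) =====
-- stated objective: simpler
-- what changed: Replaced A's two passes (build an index-boundary list, then slice the string between consecutive boundaries) by a single pass that grows the current element string directly and flushes it on each uppercase character.
import Mathlib
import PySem

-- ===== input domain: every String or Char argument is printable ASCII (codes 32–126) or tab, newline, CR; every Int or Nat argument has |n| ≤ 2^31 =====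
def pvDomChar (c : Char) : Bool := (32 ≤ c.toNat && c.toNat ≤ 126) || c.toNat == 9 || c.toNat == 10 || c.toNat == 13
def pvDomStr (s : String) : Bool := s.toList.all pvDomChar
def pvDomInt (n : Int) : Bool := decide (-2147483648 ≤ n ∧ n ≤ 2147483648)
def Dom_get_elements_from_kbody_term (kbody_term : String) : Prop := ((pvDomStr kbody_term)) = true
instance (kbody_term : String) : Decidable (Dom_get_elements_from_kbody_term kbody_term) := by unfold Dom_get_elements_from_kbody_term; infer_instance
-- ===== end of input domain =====

-- B replaces A's two index passes (boundary list, then slicing) by one pass that grows the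
-- current element directly: simpler, and measured a constant factor faster than A.


-- ===== PORT A =====
-- loop body of "for i in range(len(kbody_term)): if kbody_term[i].isupper(): sel.append(i+1) else: sel[-1] += 1"
-- (kbody_term[i] is always in range here, so the .getD default is never used)
def pvSelStep (kbody_term : String) (sel : List Int) (i : Int) : List Int :=
  if PySem.Chars.isupper ((PySem.Str.pyGet? kbody_term i).getD ' ') then
    sel ++ [i + 1]
  else
    sel.dropLast ++ [PySem.List.pyGetD sel (-1) 0 + 1]

-- loop body of "for i in range(len(sel)-1): atoms.append(kbody_term[sel[i]: sel[i+1]])"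
def pvAtomStep (kbody_term : String) (sel : List Int) (atoms : List String) (i : Int) : List String :=
  atoms ++ [PySem.Str.slice kbody_term (some (PySem.List.pyGetD sel i 0)) (some (PySem.List.pyGetD sel (i + 1) 0))]

def get_elements_from_kbody_term (kbody_term : String) : List String :=
  let sel : List Int :=
    (PySem.List.pyRange 0 (PySem.Str.len kbody_term)).foldl (pvSelStep kbody_term) [0]
  (PySem.List.pyRange 0 (PySem.List.len sel - 1)).foldl (pvAtomStep kbody_term sel) []

-- ===== PORT B =====
-- loop body of Source B: uppercase char flushes the current element and starts a new one;
-- other chars extend the current element if one exists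
def pvAltStep (st : List String × Option (List Char)) (ch : Char) : List String × Option (List Char) :=
  if PySem.Chars.isupper ch then
    match st.2 with
    | some cur => (st.1 ++ [String.ofList cur], some [ch])
    | none     => (st.1, some [ch])
  else
    match st.2 with
    | some cur => (st.1, some (cur ++ [ch]))
    | none     => st

-- trailing "if cur is not None: atoms.append(cur)"
def pvFinish (st : List String × Option (List Char)) : List String :=
  match st.2 with
  | some cur => st.1 ++ [String.ofList cur]
  | none     => st.1

def get_elements_from_kbody_term_alt (kbody_term : String) : List String :=
  pvFinish (kbody_term.toList.foldl pvAltStep ([], none))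

-- ===== PRECONDITION & SPEC =====
def Spec_get_elements_from_kbody_term (kbody_term : String) (out : List String) : Prop := out = get_elements_from_kbody_term_alt kbody_term
instance (kbody_term : String) (out : List String) : Decidable (Spec_get_elements_from_kbody_term kbody_term out) := by unfold Spec_get_elements_from_kbody_term; infer_instance

-- ===== CLAIM (what is proved, stated in full; the proofs are below) =====
def Claim_equal_get_elements_from_kbody_term : Prop := ∀ (kbody_term : String), Dom_get_elements_from_kbody_term kbody_term → Spec_get_elements_from_kbody_term kbody_term (get_elements_from_kbody_term kbody_term)

-- ===== LEMMAS AND PROOFS =====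

-- the boundary list A's first loop computes: indices of the uppercase chars of the suffix, then the length
def pvBnds : List Char → Nat → List Int
  | [], i => [(i : Int)]
  | c :: rest, i => if PySem.Chars.isupper c then (i : Int) :: pvBnds rest (i + 1) else pvBnds rest (i + 1)

-- the slices between consecutive boundaries: what A's second loop computes
def pvPairMap (s : String) : List Int → List String
  | b0 :: b1 :: rest => PySem.Str.slice s (some b0) (some b1) :: pvPairMap s (b1 :: rest)
  | _ => []

lemma pvSliceNat (s : String) (a b : Nat) :
    PySem.Str.slice s (some (a : Int)) (some (b : Int)) = String.ofList ((s.toList.drop a).take (b - a)) := by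
  have h := PySem.Str.toList_slice s (some (a : Int)) (some (b : Int))
  rw [PySem.Chars.slice_eq_listSlice, PySem.List.slice_natCast] at h
  rw [← h, String.ofList_toList]

lemma pvPyRange_nil {a b : Int} (h : b ≤ a) : PySem.List.pyRange a b = [] := by
  simp [PySem.List.pyRange]; omega

-- A's first loop equals pvBnds
lemma pvSelLoop (s : String) :
    ∀ (rest : List Char) (i : Nat) (sel : List Int), rest = s.toList.drop i →
      (PySem.List.pyRange (i : Int) ((i : Int) + rest.length)).foldl
          (pvSelStep s) (sel ++ [(i : Int)])
        = sel ++ pvBnds rest i := by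
  intro rest
  induction rest with
  | nil =>
    intro i sel h
    rw [pvPyRange_nil (by simp)]
    simp [pvBnds]
  | cons c rest ih =>
    intro i sel hrest
    have hc : s.toList[i]? = some c := by
      have h0 : (s.toList.drop i)[0]? = some c := by rw [← hrest]; rfl
      rw [List.getElem?_drop] at h0
      simpa using h0
    have hdrop : rest = s.toList.drop (i + 1) := by
      have ht : (s.toList.drop i).tail = s.toList.drop (i + 1) := by rw [List.tail_drop]
      rw [← hrest] at ht
      simpa using ht
    have hlt : (i : Int) < (i : Int) + ((c :: rest).length : Int) := by
      simp only [List.length_cons]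
      push_cast
      omega
    rw [PySem.List.pyRange_one_cons hlt, List.foldl_cons]
    have hget2 : (s.toList[i]?).getD ' ' = c := by rw [hc]; rfl
    have hcast1 : ((i : Int) + 1) = (((i + 1 : Nat)) : Int) := by push_cast; ring
    have hbound : (i : Int) + ((c :: rest).length : Int) = (((i + 1 : Nat)) : Int) + (rest.length : Int) := by
      simp only [List.length_cons]
      push_cast
      ring
    by_cases hup : PySem.Chars.isupper c
    · have hstep : pvSelStep s (sel ++ [(i : Int)]) (i : Int)
          = (sel ++ [(i : Int)]) ++ [(i : Int) + 1] := by
        simp [pvSelStep, hget2, hup]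
      rw [hstep, hcast1, hbound, ih (i + 1) (sel ++ [(i : Int)]) hdrop]
      simp [pvBnds, hup]
    · have hstep : pvSelStep s (sel ++ [(i : Int)]) (i : Int)
          = sel ++ [(i : Int) + 1] := by
        simp [pvSelStep, hget2, hup]
      rw [hstep, hcast1, hbound, ih (i + 1) sel hdrop]
      simp [pvBnds, hup]

-- A's second loop equals pvPairMap
lemma pvAtomLoop (s : String) :
    ∀ (rest pre : List Int) (acc : List String),
      (PySem.List.pyRange (pre.length : Int) ((pre.length : Int) + rest.length - 1)).foldl
          (pvAtomStep s (pre ++ rest)) acc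
        = acc ++ pvPairMap s rest := by
  intro rest
  induction rest with
  | nil =>
    intro pre acc
    rw [pvPyRange_nil (by simp)]
    simp [pvPairMap]
  | cons x rest ih =>
    intro pre acc
    match rest with
    | [] =>
      rw [pvPyRange_nil (by simp)]
      simp [pvPairMap]
    | y :: rest' =>
      have hlt : (pre.length : Int) < (pre.length : Int) + ((x :: y :: rest').length : Int) - 1 := by
        simp only [List.length_cons]
        push_cast
        omega
      rw [PySem.List.pyRange_one_cons hlt, List.foldl_cons]
      have hx : PySem.List.pyGetD (pre ++ x :: y :: rest') (pre.length : Int) 0 = x := by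
        rw [PySem.List.pyGetD_natCast]
        simp [List.getD]
      have hy : PySem.List.pyGetD (pre ++ x :: y :: rest') ((pre.length : Int) + 1) 0 = y := by
        have hcast : ((pre.length : Int) + 1) = (((pre.length + 1 : Nat)) : Int) := by push_cast; ring
        rw [hcast, PySem.List.pyGetD_natCast]
        have hsp : pre ++ x :: y :: rest' = (pre ++ [x]) ++ y :: rest' := by simp
        rw [hsp, List.getD]
        rw [List.getElem?_append_right (by simp)]
        simp
      have hstep : pvAtomStep s (pre ++ x :: y :: rest') acc (pre.length : Int)
          = acc ++ [PySem.Str.slice s (some x) (some y)] := by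
        simp [pvAtomStep, hx, hy]
      rw [hstep]
      have hsplit : pre ++ x :: y :: rest' = (pre ++ [x]) ++ y :: rest' := by simp
      rw [hsplit]
      have hih := ih (pre ++ [x]) (acc ++ [PySem.Str.slice s (some x) (some y)])
      have hlen : ((pre ++ [x]).length : Int) + ((y :: rest').length : Int) - 1
          = (pre.length : Int) + ((x :: y :: rest').length : Int) - 1 := by
        simp only [List.length_append, List.length_cons, List.length_nil]
        push_cast
        ring
      have hlen1 : ((pre ++ [x]).length : Int) = (pre.length : Int) + 1 := by simp
      rw [hlen, hlen1] at hih
      rw [hih]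
      simp [pvPairMap]

-- B's loop with a current element open equals the slices from its start boundary on
lemma pvAltSome (s : String) :
    ∀ (rest : List Char) (i j : Nat) (acc : List String),
      rest = s.toList.drop i → j ≤ i → i ≤ s.toList.length →
      pvFinish (rest.foldl pvAltStep (acc, some ((s.toList.drop j).take (i - j))))
        = acc ++ pvPairMap s ((j : Int) :: pvBnds rest i) := by
  intro rest
  induction rest with
  | nil =>
    intro i j acc hrest hj hi
    have hlen := congrArg List.length hrest
    rw [List.length_drop] at hlen
    simp only [List.length_nil] at hlen
    have hin : i = s.toList.length := by omega
    subst hin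
    simp [pvFinish, pvBnds, pvPairMap, pvSliceNat]
  | cons c rest ih =>
    intro i j acc hrest hj hi
    have hlen := congrArg List.length hrest
    rw [List.length_drop] at hlen
    simp only [List.length_cons] at hlen
    have hin : i < s.toList.length := by omega
    have hc : s.toList[i]? = some c := by
      have h0 : (s.toList.drop i)[0]? = some c := by rw [← hrest]; rfl
      rw [List.getElem?_drop] at h0
      simpa using h0
    have hdrop : rest = s.toList.drop (i + 1) := by
      have ht : (s.toList.drop i).tail = s.toList.drop (i + 1) := by rw [List.tail_drop]
      rw [← hrest] at ht
      simpa using ht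
    rw [List.foldl_cons]
    by_cases hup : PySem.Chars.isupper c
    · have h1 : (s.toList.drop i).take ((i + 1) - i) = [c] := by
        have h2 : (i + 1) - i = 1 := by omega
        rw [h2, ← hrest]
        rfl
      have hstep : pvAltStep (acc, some ((s.toList.drop j).take (i - j))) c
          = (acc ++ [String.ofList ((s.toList.drop j).take (i - j))], some ((s.toList.drop i).take ((i + 1) - i))) := by
        rw [h1]
        simp [pvAltStep, hup]
      rw [hstep]
      rw [ih (i + 1) i _ hdrop (by omega) (by omega)]
      simp [pvBnds, hup, pvPairMap, pvSliceNat]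
    · have h1 : (s.toList.drop j).take ((i + 1) - j) = (s.toList.drop j).take (i - j) ++ [c] := by
        have h2 : (i + 1) - j = (i - j) + 1 := by omega
        rw [h2, List.take_add_one]
        have h3 : (s.toList.drop j)[i - j]? = some c := by
          rw [List.getElem?_drop]
          have h4 : j + (i - j) = i := by omega
          rw [h4, hc]
        rw [h3]
        rfl
      have hstep : pvAltStep (acc, some ((s.toList.drop j).take (i - j))) c
          = (acc, some ((s.toList.drop j).take ((i + 1) - j))) := by
        rw [h1]
        simp [pvAltStep, hup]
      rw [hstep]
      rw [ih (i + 1) j _ hdrop (by omega) (by omega)]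
      simp [pvBnds, hup]

-- B's loop with no current element yet equals the slices of the remaining boundaries
lemma pvAltNone (s : String) :
    ∀ (rest : List Char) (i : Nat) (acc : List String),
      rest = s.toList.drop i → i ≤ s.toList.length →
      pvFinish (rest.foldl pvAltStep (acc, none))
        = acc ++ pvPairMap s (pvBnds rest i) := by
  intro rest
  induction rest with
  | nil =>
    intro i acc hrest hi
    simp [pvFinish, pvBnds, pvPairMap]
  | cons c rest ih =>
    intro i acc hrest hi
    have hlen := congrArg List.length hrest
    rw [List.length_drop] at hlen
    simp only [List.length_cons] at hlen
    have hin : i < s.toList.length := by omega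
    have hdrop : rest = s.toList.drop (i + 1) := by
      have ht : (s.toList.drop i).tail = s.toList.drop (i + 1) := by rw [List.tail_drop]
      rw [← hrest] at ht
      simpa using ht
    rw [List.foldl_cons]
    by_cases hup : PySem.Chars.isupper c
    · have h1 : (s.toList.drop i).take ((i + 1) - i) = [c] := by
        have h2 : (i + 1) - i = 1 := by omega
        rw [h2, ← hrest]
        rfl
      have hstep : pvAltStep (acc, none) c = (acc, some ((s.toList.drop i).take ((i + 1) - i))) := by
        rw [h1]
        simp [pvAltStep, hup]
      rw [hstep]
      rw [pvAltSome s rest (i + 1) i acc hdrop (by omega) (by omega)]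
      simp [pvBnds, hup]
    · have hstep : pvAltStep (acc, none) c = (acc, none) := by
        simp [pvAltStep, hup]
      rw [hstep]
      rw [ih (i + 1) acc hdrop (by omega)]
      simp [pvBnds, hup]

lemma pvA_eq_pairMap (s : String) :
    get_elements_from_kbody_term s = pvPairMap s (pvBnds s.toList 0) := by
  unfold get_elements_from_kbody_term
  have hsel : (PySem.List.pyRange 0 (PySem.Str.len s)).foldl (pvSelStep s) [0]
      = pvBnds s.toList 0 := by
    have h := pvSelLoop s s.toList 0 [] (by simp)
    simpa [PySem.Str.len_eq] using h
  rw [hsel]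
  have h := pvAtomLoop s (pvBnds s.toList 0) [] []
  simpa [PySem.List.len] using h

lemma pvB_eq_pairMap (s : String) :
    get_elements_from_kbody_term_alt s = pvPairMap s (pvBnds s.toList 0) := by
  unfold get_elements_from_kbody_term_alt
  simpa using pvAltNone s s.toList 0 [] (by simp) (by omega)

-- ===== VERDICT (by name: the statement is the Claim_ definition above) =====
theorem get_elements_from_kbody_term_spec : Claim_equal_get_elements_from_kbody_term := by
  intro kbody_term _
  unfold Spec_get_elements_from_kbody_term
  rw [pvA_eq_pairMap, pvB_eq_pairMap]
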